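-- pv_equiv track=rewrite | github.com/DrDab/fun-with-python | MontyHallProblem.py | getRemainingChoices
-- ===== SOURCE A (Python) =====
-- def getRemainingChoices(toExclude, lo, hi):
--     uwu = []
--     for i in range(lo, hi):
--         canAdd = True
--         for j in toExclude:
--             if i == j:
--                 canAdd = False
--         if canAdd:
--             uwu.append(i)
--     return uwu
-- ===== SOURCE B (Python) =====
-- def getRemainingChoices(toExclude, lo, hi):
--     return sorted(set(range(lo, hi)) - set(toExclude))
-- ===== Notes on version B (the rewrite author's own statement) =====
-- stated objective: simpler
-- what changed: Replaces the nested scan-and-filter loops with a one-liner: set difference (range set minus excluded set) followed by an ascending sort.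
import Mathlib
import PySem

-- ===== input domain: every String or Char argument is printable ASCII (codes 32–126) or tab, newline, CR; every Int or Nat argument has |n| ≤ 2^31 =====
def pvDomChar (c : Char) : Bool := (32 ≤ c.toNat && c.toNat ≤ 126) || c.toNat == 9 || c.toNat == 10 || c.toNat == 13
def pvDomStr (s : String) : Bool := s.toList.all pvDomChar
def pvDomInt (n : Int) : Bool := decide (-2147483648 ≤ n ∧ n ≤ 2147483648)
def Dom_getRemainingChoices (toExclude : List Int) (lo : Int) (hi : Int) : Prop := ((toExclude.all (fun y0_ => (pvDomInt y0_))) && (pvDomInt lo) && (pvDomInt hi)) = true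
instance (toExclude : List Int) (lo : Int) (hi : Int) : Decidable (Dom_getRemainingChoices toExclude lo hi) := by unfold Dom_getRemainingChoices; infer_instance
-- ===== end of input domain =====

-- B replaces A's nested scan-and-filter loops by a set difference followed by an ascending sort (objective: simpler).

-- ===== PORT A =====
def getRemainingChoices (toExclude : List Int) (lo : Int) (hi : Int) : List Int :=
  (PySem.List.pyRange lo hi 1).foldl (fun uwu i =>
    let canAdd := toExclude.foldl (fun c j => if i == j then false else c) true
    if canAdd then uwu ++ [i] else uwu) []

-- ===== PORT B =====
def getRemainingChoices_alt (toExclude : List Int) (lo : Int) (hi : Int) : List Int :=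
  PySem.List.sorted
    (PySem.Set.diff (PySem.Set.ofList (PySem.List.pyRange lo hi 1)) (PySem.Set.ofList toExclude))
    (fun x => x) false

-- ===== PRECONDITION & SPEC =====
def Spec_getRemainingChoices (toExclude : List Int) (lo : Int) (hi : Int) (out : List Int) : Prop := out = getRemainingChoices_alt toExclude lo hi
instance (toExclude : List Int) (lo : Int) (hi : Int) (out : List Int) : Decidable (Spec_getRemainingChoices toExclude lo hi out) := by unfold Spec_getRemainingChoices; infer_instance

-- ===== CLAIM (what is proved, stated in full; the proofs are below) =====
def Claim_equal_getRemainingChoices : Prop := ∀ (toExclude : List Int) (lo : Int) (hi : Int), Dom_getRemainingChoices toExclude lo hi → Spec_getRemainingChoices toExclude lo hi (getRemainingChoices toExclude lo hi)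

-- ===== LEMMAS AND PROOFS =====

-- A's inner loop over toExclude computes 'b && (i ∉ toExclude)'.
theorem inner_fold_eq (toExclude : List Int) (i : Int) (b : Bool) :
    toExclude.foldl (fun c j => if i == j then false else c) b
      = (b && !decide (i ∈ toExclude)) := by
  induction toExclude generalizing b with
  | nil => simp
  | cons x xs ih =>
    simp only [List.foldl_cons, List.mem_cons, ih]
    by_cases h : i = x <;> simp [h]

-- ===== VERDICT (by name: the statement is the Claim_ definition above) =====
theorem getRemainingChoices_spec : Claim_equal_getRemainingChoices := by
  intro toExclude lo hi _
  show getRemainingChoices toExclude lo hi = getRemainingChoices_alt toExclude lo hi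
  unfold getRemainingChoices getRemainingChoices_alt
  -- A side: the outer loop is a filter
  have hA : (PySem.List.pyRange lo hi 1).foldl (fun uwu i =>
      let canAdd := toExclude.foldl (fun c j => if i == j then false else c) true
      if canAdd then uwu ++ [i] else uwu) []
      = (PySem.List.pyRange lo hi 1).filter (fun i => !decide (i ∈ toExclude)) := by
    have := PySem.List.foldl_append_if_eq_filter
      (p := fun i => toExclude.foldl (fun c j => if i == j then false else c) true)
      (l := PySem.List.pyRange lo hi 1) (acc := [])
    simp only [this, List.nil_append]
    exact List.filter_congr (fun i _ => by rw [inner_fold_eq]; simp)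
  rw [hA]
  -- B side
  have hnd : (PySem.List.pyRange lo hi 1).Nodup := PySem.List.nodup_pyRange_one lo hi
  rw [PySem.Set.ofList_eq_self_of_nodup _ hnd]
  have hdiff : PySem.Set.diff (PySem.List.pyRange lo hi 1) (PySem.Set.ofList toExclude)
      = (PySem.List.pyRange lo hi 1).filter (fun i => !decide (i ∈ toExclude)) := by
    simp only [PySem.Set.diff]
    exact List.filter_congr (fun i _ => by
      simp [PySem.Set.mem_ofList])
  rw [hdiff]
  have hpw : ((PySem.List.pyRange lo hi 1).filter (fun i => !decide (i ∈ toExclude))).Pairwise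
      (fun a b : Int => (fun x => x) a ≤ (fun x => x) b) :=
    ((PySem.List.pairwise_lt_pyRange_one (a := lo) (b := hi)).sublist
      List.filter_sublist).imp le_of_lt
  exact (PySem.List.sorted_eq_self_of_pairwise _ _ hpw).symm
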